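-- pv_equiv track=rewrite | github.com/yunnie05/Introduction-to-Programming | Week 4/ip041.py | extremes
-- ===== SOURCE A (Python) =====
-- def extremes(words):
--     a= len(words[0])
--     b= len(words[0])
--     for i in words:
--         if len(i) < a:
--             a= len(i)
--         elif len(i) > b:
--             b= len(i)
--     return (a,b)
-- ===== SOURCE B (Python) =====
-- def extremes(words):
--     s = sorted(len(w) for w in words)
--     return (s[0], s[-1])
-- ===== Notes on version B (the rewrite author's own statement) =====
-- stated objective: alternative
-- what changed: Replaces the single comparison-based scan keeping running min/max with sorting the list of word lengths and reading the first and last element of the sorted list.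
import Mathlib
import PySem

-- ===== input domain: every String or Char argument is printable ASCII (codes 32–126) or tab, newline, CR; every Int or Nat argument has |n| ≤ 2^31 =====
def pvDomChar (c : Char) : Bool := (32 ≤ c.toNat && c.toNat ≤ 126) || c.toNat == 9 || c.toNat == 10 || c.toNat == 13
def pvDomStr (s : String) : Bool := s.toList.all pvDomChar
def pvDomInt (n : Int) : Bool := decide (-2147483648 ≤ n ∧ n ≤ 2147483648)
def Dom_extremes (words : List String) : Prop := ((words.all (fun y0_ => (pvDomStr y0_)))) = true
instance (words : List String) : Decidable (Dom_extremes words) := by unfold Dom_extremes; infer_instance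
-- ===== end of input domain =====

-- B replaces A's running min/max scan by sorting the word lengths and taking the first and last element.

-- ===== PORT A =====
-- A: a = b = len(words[0]); one pass keeping running min in a and running max in b.
def extremes (words : List String) : Int × Int :=
  match PySem.List.pyGet? words 0 with
  | none => (0, 0)   -- words[0] raises IndexError in Python; excluded by Pre_extremes
  | some w0 =>
    words.foldl
      (fun (ab : Int × Int) i =>
        if PySem.Str.len i < ab.1 then (PySem.Str.len i, ab.2)
        else if PySem.Str.len i > ab.2 then (ab.1, PySem.Str.len i)
        else ab)
      (PySem.Str.len w0, PySem.Str.len w0)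

-- ===== PORT B =====
-- B: s = sorted(len(w) for w in words); return (s[0], s[-1]).
def extremes_alt (words : List String) : Int × Int :=
  let s := PySem.List.sorted (words.map PySem.Str.len) (fun x => x) false
  (PySem.List.pyGetD s 0 0, PySem.List.pyGetD s (-1) 0)
  -- s[0] / s[-1] raise IndexError on empty words; excluded by Pre_extremes

-- ===== PRECONDITION & SPEC =====
-- Pre_ excludes only the empty list, on which both A (words[0]) and B (s[0]) raise IndexError.
def Pre_extremes (words : List String) : Prop := words ≠ []
instance (words : List String) : Decidable (Pre_extremes words) := by unfold Pre_extremes; infer_instance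
def pvWitness_extremes : List String := ["ab", "c", "defg"]

def Spec_extremes (words : List String) (out : Int × Int) : Prop := out = extremes_alt words
instance (words : List String) (out : Int × Int) : Decidable (Spec_extremes words out) := by unfold Spec_extremes; infer_instance

-- ===== CLAIM (what is proved, stated in full; the proofs are below) =====
def Claim_equal_extremes : Prop := ∀ (words : List String), Dom_extremes words → Pre_extremes words → Spec_extremes words (extremes words)

-- ===== LEMMAS AND PROOFS =====

-- A's loop body, on state (a,b) with a ≤ b, is exactly (min a (len i), max b (len i)).
lemma foldl_step_eq_minmax {α : Type} (g : α → Int) (l : List α) :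
    ∀ a b : Int, a ≤ b →
      l.foldl (fun (ab : Int × Int) i =>
        if g i < ab.1 then (g i, ab.2) else if g i > ab.2 then (ab.1, g i) else ab) (a, b)
      = ((l.map g).foldl min a, (l.map g).foldl max b) := by
  induction l with
  | nil => intro a b _; rfl
  | cons x t ih =>
    intro a b hab
    simp only [List.foldl_cons, List.map_cons]
    have hstep : (if g x < a then (g x, b) else if g x > b then (a, g x) else (a, b))
        = (min a (g x), max b (g x)) := by
      split_ifs with h1 h2 <;> simp [min_def, max_def] <;> omega
    rw [hstep, ih (min a (g x)) (max b (g x)) (by simp [min_def, max_def]; omega)]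

lemma foldl_min_mem (l : List Int) : ∀ a : Int, l.foldl min a ∈ a :: l := by
  induction l with
  | nil => intro a; simp
  | cons x t ih =>
    intro a
    simp only [List.foldl_cons]
    rcases List.mem_cons.mp (ih (min a x)) with h | h
    · rw [h]
      rcases le_total a x with hx | hx
      · simp [min_eq_left hx]
      · simp [min_eq_right hx]
    · simp [h]

lemma foldl_min_le (l : List Int) : ∀ a : Int, ∀ y ∈ a :: l, l.foldl min a ≤ y := by
  induction l with
  | nil => intro a y hy; simp_all
  | cons x t ih =>
    intro a y hy
    simp only [List.foldl_cons]
    rcases List.mem_cons.mp hy with rfl | hy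
    · exact le_trans (ih (min y x) (min y x) (by simp)) (min_le_left _ _)
    · rcases List.mem_cons.mp hy with rfl | hy
      · exact le_trans (ih (min a y) (min a y) (by simp)) (min_le_right _ _)
      · exact ih (min a x) y (List.mem_cons_of_mem _ hy)

lemma foldl_max_mem (l : List Int) : ∀ a : Int, l.foldl max a ∈ a :: l := by
  induction l with
  | nil => intro a; simp
  | cons x t ih =>
    intro a
    simp only [List.foldl_cons]
    rcases List.mem_cons.mp (ih (max a x)) with h | h
    · rw [h]
      rcases le_total a x with hx | hx
      · simp [max_eq_right hx]
      · simp [max_eq_left hx]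
    · simp [h]

lemma le_foldl_max (l : List Int) : ∀ a : Int, ∀ y ∈ a :: l, y ≤ l.foldl max a := by
  induction l with
  | nil => intro a y hy; simp_all
  | cons x t ih =>
    intro a y hy
    simp only [List.foldl_cons]
    rcases List.mem_cons.mp hy with rfl | hy
    · exact le_trans (le_max_left _ _) (ih (max y x) (max y x) (by simp))
    · rcases List.mem_cons.mp hy with rfl | hy
      · exact le_trans (le_max_right _ _) (ih (max a y) (max a y) (by simp))
      · exact ih (max a x) y (List.mem_cons_of_mem _ hy)

-- ===== VERDICT (by name: the statement is the Claim_ definition above) =====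
theorem extremes_spec : Claim_equal_extremes := by
  intro words _ hpre
  unfold Spec_extremes
  match words with
  | [] => exact absurd rfl hpre
  | w :: ws =>
    set ls : List Int := (w :: ws).map PySem.Str.len with hls
    have hlsne : ls ≠ [] := by simp [hls]
    have hsne : PySem.List.sorted ls (fun x => x) false ≠ [] := by
      rw [Ne, PySem.List.sorted_eq_nil_iff]; exact hlsne
    obtain ⟨m, t, hst⟩ := List.exists_cons_of_ne_nil hsne
    have hperm : (PySem.List.sorted ls (fun x => x) false).Perm ls :=
      PySem.List.sorted_perm ls _ false
    have hmle : ∀ y ∈ ls, m ≤ y := by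
      intro y hy
      simpa using PySem.List.key_head_sorted_le (xs := ls) (key := fun x => x) hst y hy
    have hmem : m ∈ ls := hperm.mem_iff.mp (by simp [hst])
    have hpw : (PySem.List.sorted ls (fun x => x) false).Pairwise (fun a b => a ≤ b) := by
      simpa using PySem.List.sorted_pairwise ls (fun x => x)
    have hMlast : (PySem.List.sorted ls (fun x => x) false).getLast hsne ∈ ls :=
      hperm.mem_iff.mp (List.getLast_mem hsne)
    have hgeM : ∀ y ∈ ls, y ≤ (PySem.List.sorted ls (fun x => x) false).getLast hsne := by
      intro y hy
      have hy' : y ∈ PySem.List.sorted ls (fun x => x) false := hperm.mem_iff.mpr hy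
      have hrev : ((PySem.List.sorted ls (fun x => x) false).reverse).Pairwise
          (fun a b => b ≤ a) := (List.pairwise_reverse).mpr hpw
      have hne' : (PySem.List.sorted ls (fun x => x) false).reverse ≠ [] := by
        simpa using hsne
      obtain ⟨m', t', hrv⟩ := List.exists_cons_of_ne_nil hne'
      have hm' : (PySem.List.sorted ls (fun x => x) false).getLast hsne = m' := by
        rw [List.getLast_eq_head_reverse]
        simp [hrv]
      have hy'' : y ∈ m' :: t' := by rw [← hrv]; simpa using hy'
      rw [hrv] at hrev
      rw [hm']
      rcases List.mem_cons.mp hy'' with rfl | hy''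
      · exact le_rfl
      · exact List.rel_of_pairwise_cons hrev hy''
    -- evaluate A
    have hget : PySem.List.pyGet? (w :: ws) 0 = some w := by
      simp [PySem.List.pyGet?, PySem.List.pyIdx?]
    have hfm := foldl_step_eq_minmax PySem.Str.len (w :: ws)
      (PySem.Str.len w) (PySem.Str.len w) le_rfl
    simp only [extremes, hget, hfm, ← hls]
    -- evaluate B
    unfold extremes_alt
    simp only [← hls, hst, PySem.List.pyGetD_zero_cons]
    have hlast : PySem.List.pyGetD (m :: t) (-1) (0 : Int)
        = (PySem.List.sorted ls (fun x => x) false).getLast hsne := by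
      rw [← hst]
      exact PySem.List.pyGetD_neg_one _ 0 hsne
    rw [hlast]
    simp only [Prod.mk.injEq]
    have hw0 : PySem.Str.len w ∈ ls := by simp [hls]
    constructor
    · exact le_antisymm
        (foldl_min_le ls (PySem.Str.len w) m (List.mem_cons_of_mem _ hmem))
        (by rcases List.mem_cons.mp (foldl_min_mem ls (PySem.Str.len w)) with h | h
            · rw [h]; exact hmle _ hw0
            · exact hmle _ h)
    · exact le_antisymm
        (by rcases List.mem_cons.mp (foldl_max_mem ls (PySem.Str.len w)) with h | h
            · rw [h]; exact hgeM _ hw0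
            · exact hgeM _ h)
        (le_foldl_max ls (PySem.Str.len w) _ (List.mem_cons_of_mem _ hMlast))
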